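-- pv_equiv track=rewrite | github.com/lusegomez/Cripto-1Q2023 | src/generate_inverse_table.py | generate_multiplicative_inverses
-- ===== SOURCE A (Python) =====
-- def generate_multiplicative_inverses(mod):
--     inverses = {}
--     for num in range(1, mod):
--         for inv in range(1, mod):
--             if (num * inv) % mod == 1:
--                 inverses[num] = inv
--                 break
--     return inverses
-- ===== SOURCE B (Python) =====
-- def _egcd(a, b):
--     if a == 0:
--         return (b, 0, 1)
--     g, x, y = _egcd(b % a, a)
--     return (g, y - (b // a) * x, x)
--
-- def generate_multiplicative_inverses(mod):
--     inverses = {}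
--     for num in range(1, mod):
--         g, x, _ = _egcd(num, mod)
--         if g == 1:
--             inverses[num] = x % mod
--     return inverses
-- ===== Notes on version B (the rewrite author's own statement) =====
-- stated objective: faster
-- what changed: Replaces the quadratic brute-force inner scan for each element's inverse by a per-element extended Euclidean algorithm (inverse taken mod m), relying on uniqueness of the modular inverse.
import Mathlib
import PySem

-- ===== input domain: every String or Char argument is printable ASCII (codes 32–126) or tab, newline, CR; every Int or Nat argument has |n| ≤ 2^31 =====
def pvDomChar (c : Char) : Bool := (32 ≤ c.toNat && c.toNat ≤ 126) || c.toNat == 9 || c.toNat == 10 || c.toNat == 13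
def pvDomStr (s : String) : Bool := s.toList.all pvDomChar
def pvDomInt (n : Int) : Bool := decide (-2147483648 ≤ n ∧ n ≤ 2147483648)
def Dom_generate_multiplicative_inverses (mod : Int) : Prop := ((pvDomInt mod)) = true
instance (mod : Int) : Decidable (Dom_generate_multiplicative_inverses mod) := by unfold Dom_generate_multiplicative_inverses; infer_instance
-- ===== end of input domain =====

-- B replaces A's brute-force inner scan by an extended-Euclid inverse per element: O(mod log mod) vs O(mod^2); equivalence rests on the uniqueness of the modular inverse.

-- ===== PORT A =====
-- A: for num in range(1, mod): scan inv in range(1, mod) for the first inv with (num*inv) % mod == 1 (break), storing it in a dict.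
def generate_multiplicative_inverses (mod : Int) : List (Int × Int) :=
  ((PySem.List.pyRange 1 mod 1).foldl (fun inverses num =>
    match (PySem.List.pyRange 1 mod 1).find? (fun inv => PySem.Int.mod (num * inv) mod == 1) with
    | some inv => inverses.insert num inv
    | none => inverses) PySem.Dict.empty).items

-- ===== PORT B =====
-- B helper: recursive extended Euclid, exactly Source B's _egcd (Python '%' and '//' via PySem).
def egcd (a b : Int) : Int × Int × Int :=
  if _h : a = 0 then (b, 0, 1)
  else
    let r := egcd (PySem.Int.mod b a) a
    (r.1, r.2.2 - PySem.Int.floordiv b a * r.2.1, r.2.1)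
termination_by a.natAbs
decreasing_by
  rcases lt_or_gt_of_ne _h with h1 | h1
  · have h2 := PySem.Int.mod_neg_bounds b h1
    omega
  · have h2 := PySem.Int.mod_nonneg b h1
    have h3 := PySem.Int.mod_lt b h1
    omega

def generate_multiplicative_inverses_alt (mod : Int) : List (Int × Int) :=
  ((PySem.List.pyRange 1 mod 1).foldl (fun inverses num =>
    let r := egcd num mod
    if r.1 == 1 then inverses.insert num (PySem.Int.mod r.2.1 mod) else inverses)
    PySem.Dict.empty).items

-- ===== PRECONDITION & SPEC =====
def Spec_generate_multiplicative_inverses (mod : Int) (out : List (Int × Int)) : Prop := out = generate_multiplicative_inverses_alt mod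
instance (mod : Int) (out : List (Int × Int)) : Decidable (Spec_generate_multiplicative_inverses mod out) := by unfold Spec_generate_multiplicative_inverses; infer_instance

-- ===== CLAIM (what is proved, stated in full; the proofs are below) =====
def Claim_equal_generate_multiplicative_inverses : Prop := ∀ (mod : Int), Dom_generate_multiplicative_inverses mod → Spec_generate_multiplicative_inverses mod (generate_multiplicative_inverses mod)

-- ===== LEMMAS AND PROOFS =====

theorem egcd_spec (a b : Int) (ha : 0 ≤ a) (hb : 0 ≤ b) :
    (egcd a b).1 = Int.gcd a b ∧ a * (egcd a b).2.1 + b * (egcd a b).2.2 = (egcd a b).1 := by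
  induction a, b using egcd.induct with
  | case1 b => simp [egcd, Int.gcd, Int.natAbs_of_nonneg hb]
  | case2 a b h ih =>
    have ha' : 0 < a := lt_of_le_of_ne ha (Ne.symm h)
    have hm := PySem.Int.mod_eq_emod_of_pos ha' (a := b)
    have hrec : (Int.gcd a b : Int) = Int.gcd (PySem.Int.mod b a) a := by
      rw [hm, Int.gcd_emod, Int.gcd_comm]
    obtain ⟨ih1, ih2⟩ := ih (by have := PySem.Int.mod_nonneg b ha'; omega) ha
    have hfm := PySem.Int.floordiv_mul_add_mod b a
    rw [egcd]; simp only [h, dite_false]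
    constructor
    · rw [ih1, ← hrec]
    · linear_combination ih2 - hfm * (egcd (PySem.Int.mod b a) a).2.1

theorem find?_unique {α : Type} (l : List α) (p : α → Bool) (v : α) (hm : v ∈ l) (hp : p v = true)
    (hu : ∀ u ∈ l, p u = true → u = v) : l.find? p = some v := by
  induction l with
  | nil => simp at hm
  | cons x xs ih =>
    by_cases hx : p x = true
    · rw [List.find?_cons_of_pos hx]
      exact congrArg some (hu x List.mem_cons_self hx)
    · rw [List.find?_cons_of_neg (by simpa using hx)]
      rcases List.mem_cons.mp hm with h | h
      · subst h; exact absurd hp hx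
      · exact ih h (fun u hu' => hu u (List.mem_cons_of_mem _ hu'))

theorem inner_key (mod num : Int) (h1 : 1 ≤ num) (h2 : num < mod) :
    (PySem.List.pyRange 1 mod 1).find? (fun inv => PySem.Int.mod (num * inv) mod == 1)
    = if (egcd num mod).1 == 1 then some (PySem.Int.mod (egcd num mod).2.1 mod) else none := by
  have hmod : 0 < mod := by omega
  obtain ⟨hg, hbz⟩ := egcd_spec num mod (by omega) (by omega)
  have hmem : ∀ t : Int, PySem.Int.mod t mod = t % mod :=
    fun t => PySem.Int.mod_eq_emod_of_pos hmod
  have h1m : (1 : Int) % mod = 1 := Int.emod_eq_of_lt (by omega) (by omega)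
  simp only [hmem]
  by_cases hone : Int.gcd num mod = 1
  · have hg1 : (egcd num mod).1 = 1 := by rw [hg, hone]; rfl
    have hnx : num * (egcd num mod).2.1 % mod = 1 := by
      have e : num * (egcd num mod).2.1 = 1 - mod * (egcd num mod).2.2 := by
        rw [← hg1]; linarith [hbz]
      rw [e, Int.sub_mul_emod_self_left, h1m]
    have hnv : num * ((egcd num mod).2.1 % mod) % mod = 1 := by
      have e : num * ((egcd num mod).2.1 % mod) % mod = num * (egcd num mod).2.1 % mod := by
        conv_rhs => rw [Int.mul_emod]
        rw [Int.mul_emod num ((egcd num mod).2.1 % mod), Int.emod_emod_of_dvd _ dvd_rfl]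
      rw [e, hnx]
    have hv0 : 0 ≤ (egcd num mod).2.1 % mod := Int.emod_nonneg _ (by omega)
    have hvlt : (egcd num mod).2.1 % mod < mod := Int.emod_lt_of_pos _ hmod
    have hvne : (egcd num mod).2.1 % mod ≠ 0 := by
      intro h0
      rw [h0, mul_zero] at hnv
      simp at hnv
    rw [hg1]
    simp only [BEq.rfl, if_true]
    apply find?_unique
    · exact (PySem.List.mem_pyRange_one).mpr ⟨by omega, hvlt⟩
    · simpa using hnv
    · intro u hu hpu
      have hub := (PySem.List.mem_pyRange_one).mp hu
      have hnu : num * u % mod = 1 := by simpa using hpu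
      have d1 : mod ∣ num * u - 1 :=
        Int.ModEq.dvd (show Int.ModEq mod 1 (num * u) by unfold Int.ModEq; rw [hnu, h1m])
      have d2 : mod ∣ num * ((egcd num mod).2.1 % mod) - 1 :=
        Int.ModEq.dvd (show Int.ModEq mod 1 (num * ((egcd num mod).2.1 % mod)) by
          unfold Int.ModEq; rw [hnv, h1m])
      have d3 : mod ∣ num * (u - (egcd num mod).2.1 % mod) := by
        have e : num * (u - (egcd num mod).2.1 % mod)
            = (num * u - 1) - (num * ((egcd num mod).2.1 % mod) - 1) := by ring
        rw [e]; exact dvd_sub d1 d2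
      have hcop : IsCoprime (mod : Int) num := by
        rw [Int.isCoprime_iff_gcd_eq_one, Int.gcd_comm]; exact hone
      have d4 : mod ∣ u - (egcd num mod).2.1 % mod := hcop.dvd_of_dvd_mul_left d3
      have := Int.eq_zero_of_abs_lt_dvd d4 (by rw [abs_lt]; omega)
      omega
  · have hgne : ((egcd num mod).1 == 1) = false := by
      rw [hg, beq_eq_false_iff_ne]
      intro hc
      exact hone (by exact_mod_cast hc)
    simp only [hgne, Bool.false_eq_true, if_false]
    apply List.find?_eq_none.mpr
    intro u hu
    simp only [beq_iff_eq]
    intro hnu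
    have d1 : mod ∣ num * u - 1 :=
      Int.ModEq.dvd (show Int.ModEq mod 1 (num * u) by unfold Int.ModEq; rw [hnu, h1m])
    have dga : (Int.gcd num mod : Int) ∣ num := Int.gcd_dvd_left num mod
    have dgb : (Int.gcd num mod : Int) ∣ mod := Int.gcd_dvd_right num mod
    have dg1 : (Int.gcd num mod : Int) ∣ 1 := by
      have ha' : (Int.gcd num mod : Int) ∣ num * u - 1 := dvd_trans dgb d1
      have hb' : (Int.gcd num mod : Int) ∣ num * u := Dvd.dvd.mul_right dga u
      have := dvd_sub hb' ha'
      simpa using this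
    exact hone (by
      have := Int.eq_one_of_dvd_one (Int.natCast_nonneg _) dg1
      exact_mod_cast this)

-- ===== VERDICT (by name: the statement is the Claim_ definition above) =====
theorem generate_multiplicative_inverses_spec : Claim_equal_generate_multiplicative_inverses := by
  intro mod _
  unfold Spec_generate_multiplicative_inverses
  unfold generate_multiplicative_inverses generate_multiplicative_inverses_alt
  congr 1
  apply PySem.List.foldl_congr_mem
  intro acc num hnum
  have hb := (PySem.List.mem_pyRange_one).mp hnum
  rw [inner_key mod num hb.1 hb.2]
  cases hc : ((egcd num mod).1 == 1) <;> simp [hc]
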